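-- pv_equiv track=rewrite | github.com/dschonhaut/time_cells | remapping.py | pairwise_combs
-- ===== SOURCE A (Python) =====
-- def pairwise_combs(n,
--                    keep_matching=False):
--     """Return a list with all pairwise combinations."""
--     if keep_matching:
--         pairs = [(x, y)
--                  for x in range(n)
--                  for y in range(n)
--                  if (x<=y)]
--     else:
--         pairs = [(x, y)
--                  for x in range(n)
--                  for y in range(n)
--                  if (x<y)]
--     return pairs
-- ===== SOURCE B (Python) =====
-- def pairwise_combs(n,
--                    keep_matching=False):
--     """Return a list with all pairwise combinations."""
--     start = 0 if keep_matching else 1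
--     pairs = []
--     for x in range(n):
--         pairs.extend(zip((x,) * (n - x - start), range(x + start, n)))
--     return pairs
-- ===== Notes on version B (the rewrite author's own statement) =====
-- stated objective: alternative
-- what changed: B builds each row as one block, zip((x,)*(n-x-start), range(x+start, n)) extended onto the result, so the inner per-element loop and the x<y / x<=y filter over the full n*n grid disappear; A scans all n*n cells and tests each.
import Mathlib
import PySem

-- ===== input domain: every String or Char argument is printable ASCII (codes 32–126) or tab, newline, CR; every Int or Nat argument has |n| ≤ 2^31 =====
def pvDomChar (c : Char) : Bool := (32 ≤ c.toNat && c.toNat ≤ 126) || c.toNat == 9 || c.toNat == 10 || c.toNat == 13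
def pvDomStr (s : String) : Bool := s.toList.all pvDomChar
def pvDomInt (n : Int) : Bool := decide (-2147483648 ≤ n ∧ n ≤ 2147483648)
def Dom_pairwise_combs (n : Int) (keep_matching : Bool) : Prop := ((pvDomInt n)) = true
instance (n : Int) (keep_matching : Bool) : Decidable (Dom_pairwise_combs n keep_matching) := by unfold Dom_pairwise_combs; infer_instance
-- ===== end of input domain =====

-- B builds each row at once as zip((x,)*(n-x-start), range(x+start, n)) — no inner element
-- loop and no per-pair filter — instead of A's full n×n grid comprehension with an
-- x<y / x<=y filter; objective: alternative.

-- ===== PORT A =====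
-- A: one comprehension over the full n×n grid per branch, keeping the pairs passing the filter.
def pairwise_combs (n : Int) (keep_matching : Bool) : List (Int × Int) :=
  if keep_matching then
    (PySem.List.pyRange 0 n).flatMap (fun x =>
      ((PySem.List.pyRange 0 n).filter (fun y => decide (x ≤ y))).map (fun y => (x, y)))
  else
    (PySem.List.pyRange 0 n).flatMap (fun x =>
      ((PySem.List.pyRange 0 n).filter (fun y => decide (x < y))).map (fun y => (x, y)))

-- ===== PORT B =====
-- B: start = 0/1; for x in range(n): pairs.extend(zip((x,)*(n-x-start), range(x+start, n)));
-- (x,)*(n-x-start) is PySem.List.pyRepeat [x] (n-x-start), zip is List.zip.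
def pairwise_combs_alt (n : Int) (keep_matching : Bool) : List (Int × Int) :=
  let start : Int := if keep_matching then 0 else 1
  (PySem.List.pyRange 0 n).foldl (fun pairs x =>
    pairs ++ (PySem.List.pyRepeat [x] (n - x - start)).zip (PySem.List.pyRange (x + start) n)) []

-- ===== PRECONDITION & SPEC =====
def Spec_pairwise_combs (n : Int) (keep_matching : Bool) (out : List (Int × Int)) : Prop := out = pairwise_combs_alt n keep_matching
instance (n : Int) (keep_matching : Bool) (out : List (Int × Int)) : Decidable (Spec_pairwise_combs n keep_matching out) := by unfold Spec_pairwise_combs; infer_instance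

-- ===== CLAIM (what is proved, stated in full; the proofs are below) =====
def Claim_equal_pairwise_combs : Prop := ∀ (n : Int) (keep_matching : Bool), Dom_pairwise_combs n keep_matching → Spec_pairwise_combs n keep_matching (pairwise_combs n keep_matching)

-- ===== LEMMAS AND PROOFS =====

-- zipping a long-enough replicate with l pairs the constant with each element of l
theorem pvZip_replicate_map {α β : Type} (a : α) (l : List β) :
    ∀ k : Nat, l.length ≤ k → (List.replicate k a).zip l = l.map (fun y => (a, y)) := by
  induction l with
  | nil => intro k _; simp
  | cons b t ih =>
      intro k hk
      cases k with
      | zero => simp at hk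
      | succ k =>
          simp only [List.replicate_succ, List.zip_cons_cons, List.map_cons]
          rw [ih k (by simpa using hk)]

-- filtering the full range 0..n by (b ≤ ·) is the range starting at b (for 0 ≤ b)
theorem pvFilter_pyRange_ge (a b c : Int) (h : a ≤ b) :
    (PySem.List.pyRange a c).filter (fun y => decide (b ≤ y)) = PySem.List.pyRange b c := by
  by_cases hbc : b ≤ c
  · rw [PySem.List.pyRange_one_append a b c h hbc, List.filter_append]
    have h1 : (PySem.List.pyRange a b).filter (fun y => decide (b ≤ y)) = [] := by
      rw [List.filter_eq_nil_iff]
      intro y hy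
      have := PySem.List.mem_pyRange_one.mp hy
      simp only [decide_eq_true_eq]; omega
    have h2 : (PySem.List.pyRange b c).filter (fun y => decide (b ≤ y)) = PySem.List.pyRange b c := by
      rw [List.filter_eq_self]
      intro y hy
      have := PySem.List.mem_pyRange_one.mp hy
      simp only [decide_eq_true_eq]; omega
    rw [h1, h2, List.nil_append]
  · rw [PySem.List.pyRange_one_eq_nil (show c ≤ b by omega)]
    rw [List.filter_eq_nil_iff]
    intro y hy
    have := PySem.List.mem_pyRange_one.mp hy
    simp only [decide_eq_true_eq]; omega

-- B's row for x equals the mapped range row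
theorem pvRow_eq (n x start : Int) :
    (PySem.List.pyRepeat [x] (n - x - start)).zip (PySem.List.pyRange (x + start) n)
      = (PySem.List.pyRange (x + start) n).map (fun y => (x, y)) := by
  rw [PySem.List.pyRepeat_singleton]
  apply pvZip_replicate_map
  rw [PySem.List.length_pyRange_one]
  omega

-- ===== VERDICT (by name: the statement is the Claim_ definition above) =====
theorem pairwise_combs_spec : Claim_equal_pairwise_combs := by
  intro n km _
  unfold Spec_pairwise_combs pairwise_combs pairwise_combs_alt
  show _ = (PySem.List.pyRange 0 n).foldl (fun pairs x =>
    pairs ++ (PySem.List.pyRepeat [x] (n - x - (if km then 0 else 1))).zip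
      (PySem.List.pyRange (x + (if km then 0 else 1)) n)) []
  rw [PySem.List.foldl_append_eq_flatMap, List.nil_append]
  cases km with
  | true =>
      simp only [if_true]
      apply List.flatMap_congr
      intro x hx
      have hx0 := PySem.List.mem_pyRange_one.mp hx
      rw [pvRow_eq, pvFilter_pyRange_ge 0 x n (by omega)]
      norm_num
  | false =>
      simp only [Bool.false_eq_true, if_false]
      apply List.flatMap_congr
      intro x hx
      have hx0 := PySem.List.mem_pyRange_one.mp hx
      rw [pvRow_eq]
      have : (PySem.List.pyRange 0 n).filter (fun y => decide (x < y))
          = (PySem.List.pyRange 0 n).filter (fun y => decide (x + 1 ≤ y)) := by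
        apply List.filter_congr
        intro y _
        simp only [decide_eq_decide]; omega
      rw [this, pvFilter_pyRange_ge 0 (x + 1) n (by omega)]
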